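-- pv_equiv track=rewrite | github.com/Mywayking/python_stallion | stallion.py | get_encoding_type
-- ===== SOURCE A (Python) =====
-- def get_encoding_type(apparent_encoding, html_encoding_list):
--     #  utf-8 < GB2312、BIG5、GBK、GB18030
--     html_encoding = ''
--     if len(html_encoding_list) > 0:
--         html_encoding = html_encoding_list[0]
--     data_list = [apparent_encoding, html_encoding]
--     gbk_list = [x for x in data_list if "GB" in x.upper()]
--     if len(gbk_list) > 0:
--         return gbk_list[0]
--     utf_list = [x for x in data_list if "UTF" in x.upper()]
--     if len(utf_list) > 0:
--         return utf_list[0]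
--     return 'UTF-8'
-- ===== SOURCE B (Python) =====
-- def get_encoding_type(apparent_encoding, html_encoding_list):
--     html_encoding = html_encoding_list[0] if html_encoding_list else ''
--     saved = None
--     for x in (apparent_encoding, html_encoding):
--         u = x.upper()
--         if 'GB' in u:
--             return x
--         if 'UTF' in u and saved is None:
--             saved = x
--     return saved if saved is not None else 'UTF-8'
-- ===== Notes on version B (the rewrite author's own statement) =====
-- stated objective: simpler
-- what changed: Replaces the two filtering list comprehensions plus length checks with a single short-circuit loop over the two candidates that returns immediately on a GB match and remembers the first UTF match.
import Mathlib
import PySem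

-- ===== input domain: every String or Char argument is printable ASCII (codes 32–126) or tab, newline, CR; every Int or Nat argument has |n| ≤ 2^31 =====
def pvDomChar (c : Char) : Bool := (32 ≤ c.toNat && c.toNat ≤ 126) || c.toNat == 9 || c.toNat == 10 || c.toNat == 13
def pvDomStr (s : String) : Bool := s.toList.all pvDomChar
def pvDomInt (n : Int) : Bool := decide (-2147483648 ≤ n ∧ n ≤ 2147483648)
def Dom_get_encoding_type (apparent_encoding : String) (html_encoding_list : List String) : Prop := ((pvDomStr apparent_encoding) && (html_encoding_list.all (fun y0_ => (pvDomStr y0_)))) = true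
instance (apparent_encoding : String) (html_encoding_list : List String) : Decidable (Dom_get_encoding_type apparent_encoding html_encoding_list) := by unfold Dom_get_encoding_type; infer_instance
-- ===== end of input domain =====

-- ===== PORT A =====
-- B is one short-circuit pass over the two candidates instead of A's two filters; return value equivalence.
def get_encoding_type (apparent_encoding : String) (html_encoding_list : List String) : String :=
  let html_encoding : String :=
    if html_encoding_list.length > 0 then html_encoding_list.headD "" else ""
  let data_list : List String := [apparent_encoding, html_encoding]
  let gbk_list : List String := data_list.filter (fun x => PySem.Str.isIn "GB" (PySem.Str.upper x))
  if gbk_list.length > 0 then gbk_list.headD ""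
  else
    let utf_list : List String := data_list.filter (fun x => PySem.Str.isIn "UTF" (PySem.Str.upper x))
    if utf_list.length > 0 then utf_list.headD ""
    else "UTF-8"

-- ===== PORT B =====
def pvAltLoop : List String → Option String → String
  | [], saved => saved.getD "UTF-8"
  | x :: rest, saved =>
    let u := PySem.Str.upper x
    if PySem.Str.isIn "GB" u then x
    else if PySem.Str.isIn "UTF" u && saved.isNone then pvAltLoop rest (some x)
    else pvAltLoop rest saved

def get_encoding_type_alt (apparent_encoding : String) (html_encoding_list : List String) : String :=
  let html_encoding : String :=
    match html_encoding_list with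
    | [] => ""
    | h :: _ => h
  pvAltLoop [apparent_encoding, html_encoding] none

-- ===== PRECONDITION & SPEC =====
def Spec_get_encoding_type (apparent_encoding : String) (html_encoding_list : List String) (out : String) : Prop := out = get_encoding_type_alt apparent_encoding html_encoding_list
instance (apparent_encoding : String) (html_encoding_list : List String) (out : String) : Decidable (Spec_get_encoding_type apparent_encoding html_encoding_list out) := by unfold Spec_get_encoding_type; infer_instance

-- ===== CLAIM =====
def Claim_equal_get_encoding_type : Prop := ∀ (apparent_encoding : String) (html_encoding_list : List String), Dom_get_encoding_type apparent_encoding html_encoding_list → Spec_get_encoding_type apparent_encoding html_encoding_list (get_encoding_type apparent_encoding html_encoding_list)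

-- ===== LEMMAS AND PROOFS =====
theorem pv_filter2 (p q : String → Bool) (x y : String) :
    (let gbk := List.filter p [x, y]
     if gbk.length > 0 then gbk.headD ""
     else
       let utf := List.filter q [x, y]
       if utf.length > 0 then utf.headD ""
       else "UTF-8")
    = (if p x then x
       else if q x then (if p y then y else x)
       else if p y then y else if q y then y else "UTF-8") := by
  cases hpx : p x <;> cases hpy : p y <;> cases hqx : q x <;> cases hqy : q y <;>
    simp [List.filter, hpx, hpy, hqx, hqy]

theorem pv_loop2 (x y : String) :
    pvAltLoop [x, y] none =
      (if PySem.Str.isIn "GB" (PySem.Str.upper x) then x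
       else if PySem.Str.isIn "UTF" (PySem.Str.upper x) then
         (if PySem.Str.isIn "GB" (PySem.Str.upper y) then y else x)
       else if PySem.Str.isIn "GB" (PySem.Str.upper y) then y
       else if PySem.Str.isIn "UTF" (PySem.Str.upper y) then y
       else "UTF-8") := by
  simp only [pvAltLoop, Option.isNone_some, Option.isNone_none, Bool.and_false, Bool.and_true,
    Option.getD_some, Option.getD_none]
  split_ifs <;> simp_all

theorem pv_core (x y : String) :
    (let data_list : List String := [x, y]
     let gbk_list := data_list.filter (fun z => PySem.Str.isIn "GB" (PySem.Str.upper z))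
     if gbk_list.length > 0 then gbk_list.headD ""
     else
       let utf_list := data_list.filter (fun z => PySem.Str.isIn "UTF" (PySem.Str.upper z))
       if utf_list.length > 0 then utf_list.headD ""
       else "UTF-8")
    = pvAltLoop [x, y] none := by
  rw [pv_loop2]
  exact pv_filter2 (fun z => PySem.Str.isIn "GB" (PySem.Str.upper z))
    (fun z => PySem.Str.isIn "UTF" (PySem.Str.upper z)) x y

-- ===== VERDICT =====
theorem get_encoding_type_spec : Claim_equal_get_encoding_type := by
  intro apparent_encoding html_encoding_list _
  unfold Spec_get_encoding_type get_encoding_type get_encoding_type_alt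
  cases html_encoding_list with
  | nil => simpa using pv_core apparent_encoding ""
  | cons h t => simpa using pv_core apparent_encoding h
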